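-- pv_equiv track=rewrite | github.com/mikami520/MultiHem | src/utils.py | _subdivide_data
-- ===== SOURCE A (Python) =====
-- def _subdivide_data(paired_data):
--     data = {"00": [], "01": [], "10": [], "11": []}
--     for ele in paired_data:
--         if "seg1" in ele.keys() and "seg2" in ele.keys():
--             data["11"].append(ele)
--         elif "seg1" in ele.keys():
--             data["10"].append(ele)
--         elif "seg2" in ele.keys():
--             data["01"].append(ele)
--         else:
--             data["00"].append(ele)
--     return data
-- ===== SOURCE B (Python) =====
-- def _subdivide_data(paired_data):
--     def key(ele):
--         return f"{int('seg1' in ele)}{int('seg2' in ele)}"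
--     return {k: [e for e in paired_data if key(e) == k] for k in ("00", "01", "10", "11")}
-- ===== Notes on version B (the rewrite author's own statement) =====
-- stated objective: idiomatic
-- what changed: Replaces the four-way if/elif cascade appending into a mutable dict with a computed 2-bit key and a dict comprehension that builds each bucket as a filtered list.
import Mathlib
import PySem

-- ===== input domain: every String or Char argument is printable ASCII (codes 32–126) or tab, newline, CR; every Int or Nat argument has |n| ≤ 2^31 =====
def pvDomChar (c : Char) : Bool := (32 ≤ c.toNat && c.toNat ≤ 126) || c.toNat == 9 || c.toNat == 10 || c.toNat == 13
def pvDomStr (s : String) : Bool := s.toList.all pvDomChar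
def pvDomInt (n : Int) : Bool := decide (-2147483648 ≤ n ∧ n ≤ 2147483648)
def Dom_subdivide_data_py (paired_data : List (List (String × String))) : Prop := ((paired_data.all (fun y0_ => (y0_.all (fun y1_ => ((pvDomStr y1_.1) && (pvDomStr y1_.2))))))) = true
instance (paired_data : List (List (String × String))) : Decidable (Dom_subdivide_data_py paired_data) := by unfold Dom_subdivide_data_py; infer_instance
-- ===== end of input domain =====

-- B replaces A's four-way if/elif cascade by a computed 2-bit key and a per-bucket dict
-- comprehension (four filters instead of one dispatching loop); objective: idiomatic, not faster.

-- ===== PORT A =====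
-- "seg1" in ele.keys()
def pvHasKey (ele : List (String × String)) (k : String) : Bool :=
  ele.any (fun p => p.1 == k)

-- the body of A's for-loop: the four-way cascade appending ele to one bucket of the dict
def pvStepA (d : PySem.Dict String (List (List (String × String))))
    (ele : List (String × String)) : PySem.Dict String (List (List (String × String))) :=
  if pvHasKey ele "seg1" && pvHasKey ele "seg2" then d.modify "11" [] (· ++ [ele])
  else if pvHasKey ele "seg1" then d.modify "10" [] (· ++ [ele])
  else if pvHasKey ele "seg2" then d.modify "01" [] (· ++ [ele])
  else d.modify "00" [] (· ++ [ele])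

def subdivide_data_py (paired_data : List (List (String × String))) :
    List (String × List (List (String × String))) :=
  (paired_data.foldl pvStepA
    (PySem.Dict.mk [("00", []), ("01", []), ("10", []), ("11", [])])).items

-- ===== PORT B =====
-- key(ele) = f"{int('seg1' in ele)}{int('seg2' in ele)}"
def pvKeyB (ele : List (String × String)) : String :=
  String.mk [(if pvHasKey ele "seg1" then '1' else '0'),
             (if pvHasKey ele "seg2" then '1' else '0')]

def subdivide_data_py_alt (paired_data : List (List (String × String))) :
    List (String × List (List (String × String))) :=
  (["00", "01", "10", "11"] : List String).map
    (fun k => (k, paired_data.filter (fun e => pvKeyB e == k)))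

-- ===== PRECONDITION & SPEC =====
def Spec_subdivide_data_py (paired_data : List (List (String × String))) (out : List (String × List (List (String × String)))) : Prop := out = subdivide_data_py_alt paired_data
instance (paired_data : List (List (String × String))) (out : List (String × List (List (String × String)))) : Decidable (Spec_subdivide_data_py paired_data out) := by unfold Spec_subdivide_data_py; infer_instance

-- ===== CLAIM (what is proved, stated in full; the proofs are below) =====
def Claim_equal_subdivide_data_py : Prop := ∀ (paired_data : List (List (String × String))), Dom_subdivide_data_py paired_data → Spec_subdivide_data_py paired_data (subdivide_data_py paired_data)

-- ===== LEMMAS AND PROOFS =====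

-- the loop invariant: folding pvStepA over l, starting from the four explicit buckets,
-- appends to each bucket exactly the elements of l whose computed key names it
lemma foldl_stepA (l : List (List (String × String)))
    (a b c d : List (List (String × String))) :
    l.foldl pvStepA (PySem.Dict.mk [("00", a), ("01", b), ("10", c), ("11", d)]) =
      PySem.Dict.mk
        [("00", a ++ l.filter (fun e => pvKeyB e == "00")),
         ("01", b ++ l.filter (fun e => pvKeyB e == "01")),
         ("10", c ++ l.filter (fun e => pvKeyB e == "10")),
         ("11", d ++ l.filter (fun e => pvKeyB e == "11"))] := by
  induction l generalizing a b c d with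
  | nil => simp
  | cons e t ih =>
    cases h1 : pvHasKey e "seg1" <;> cases h2 : pvHasKey e "seg2" <;>
      simp [List.foldl_cons, pvStepA, h1, h2, PySem.Dict.modify, PySem.Dict.getD,
        PySem.Dict.get?, PySem.Dict.insert, PySem.Dict.contains, pvKeyB, ih,
        List.filter_cons] <;> decide

theorem subdivide_data_py_spec_aux (paired_data : List (List (String × String))) :
    subdivide_data_py paired_data = subdivide_data_py_alt paired_data := by
  unfold subdivide_data_py subdivide_data_py_alt
  rw [foldl_stepA]
  rfl

-- ===== VERDICT (by name: the statement is the Claim_ definition above) =====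
theorem subdivide_data_py_spec : Claim_equal_subdivide_data_py := by
  intro pd _
  exact subdivide_data_py_spec_aux pd
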